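-- pv_equiv track=rewrite | github.com/Clukay-Fun/Omnibot | nanobot/feishu/persona.py | _has_checked_option
-- ===== SOURCE A (Python) =====
-- def _has_checked_option(text: str, section_heading: str, labels: tuple[str, ...]) -> bool:
--     in_section = False
--     allowed = set(labels)
--     for raw_line in text.splitlines():
--         line = raw_line.strip()
--         if line.startswith("### "):
--             in_section = line == section_heading
--             continue
--         if not in_section or not line.startswith("- [x] "):
--             continue
--         label = line.removeprefix("- [x] ").strip()
--         if label in allowed:
--             return True
--     return False
-- ===== SOURCE B (Python) =====
-- def _has_checked_option(text: str, section_heading: str, labels: tuple[str, ...]) -> bool: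
--     # Pass 1: group the stripped lines into (heading, body-lines) sections.
--     sections = []
--     current = None
--     for raw_line in text.splitlines():
--         line = raw_line.strip()
--         if line.startswith("### "):
--             current = (line, [])
--             sections.append(current)
--         elif current is not None:
--             current[1].append(line)
--     # Pass 2: query the grouped structure.
--     allowed = set(labels)
--     for heading, lines in sections:
--         if heading == section_heading:
--             for line in lines:
--                 if line.startswith("- [x] ") and line.removeprefix("- [x] ").strip() in allowed:
--                     return True
--     return False
-- ===== Notes on version B (the rewrite author's own statement) =====
-- stated objective: alternative
-- what changed: Replaces A's single stateful scan with an in_section flag by a two-pass decomposition: first group the stripped lines into a list of (heading, body) sections, then query that structure for a matching section containing a checked allowed label.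
import Mathlib
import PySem

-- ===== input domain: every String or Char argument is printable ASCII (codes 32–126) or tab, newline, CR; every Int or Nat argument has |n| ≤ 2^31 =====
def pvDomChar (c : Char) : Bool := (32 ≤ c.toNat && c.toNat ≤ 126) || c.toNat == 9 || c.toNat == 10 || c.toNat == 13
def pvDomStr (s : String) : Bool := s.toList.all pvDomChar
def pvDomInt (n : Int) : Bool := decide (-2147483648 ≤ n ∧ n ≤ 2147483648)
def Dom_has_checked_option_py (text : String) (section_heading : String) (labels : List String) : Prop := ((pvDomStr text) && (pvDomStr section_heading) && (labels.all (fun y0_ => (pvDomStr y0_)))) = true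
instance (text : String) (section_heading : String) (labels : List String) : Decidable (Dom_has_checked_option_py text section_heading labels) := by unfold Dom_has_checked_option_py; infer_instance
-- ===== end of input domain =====

-- B replaces A's single stateful scan (in_section flag) by a two-pass decomposition:
-- group lines into (heading, body) sections, then query the grouped structure. Same cost; alternative structure.

-- exact port of str.removeprefix (used by both Pythons via the built-in)
def pvRemoveprefix (s p : List Char) : List Char :=
  if PySem.Chars.startswith s p then s.drop p.length else s

-- ===== PORT A =====
-- A's loop with early return, carrying the in_section flag
def pvALoop (sh : List Char) (allowed : PySem.Set (List Char)) :
    List (List Char) → Bool → Bool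
  | [], _ => false
  | raw :: rest, ins =>
    let line := PySem.Chars.strip raw
    if PySem.Chars.startswith line "### ".toList then
      pvALoop sh allowed rest (line == sh)
    else if !ins || !PySem.Chars.startswith line "- [x] ".toList then
      pvALoop sh allowed rest ins
    else if PySem.Set.contains allowed (PySem.Chars.strip (pvRemoveprefix line "- [x] ".toList)) then
      true
    else
      pvALoop sh allowed rest ins

def has_checked_option_py (text : String) (section_heading : String) (labels : List String) : Bool :=
  pvALoop section_heading.toList (PySem.Set.ofList (labels.map String.toList))
    (PySem.Chars.splitlines text.toList) false

-- ===== PORT B =====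
-- pass 1: group stripped lines into (heading, body) sections; `cur` models B's `current`
def pvGroup : List (List Char) → Option (List Char × List (List Char)) → List (List Char × List (List Char))
  | [], cur => match cur with | none => [] | some s => [s]
  | raw :: rest, cur =>
    let line := PySem.Chars.strip raw
    if PySem.Chars.startswith line "### ".toList then
      match cur with
      | none => pvGroup rest (some (line, []))
      | some s => s :: pvGroup rest (some (line, []))
    else
      match cur with
      | none => pvGroup rest none
      | some (h, ls) => pvGroup rest (some (h, ls ++ [line]))

def pvChecked (allowed : PySem.Set (List Char)) (line : List Char) : Bool :=
  PySem.Chars.startswith line "- [x] ".toList &&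
    PySem.Set.contains allowed (PySem.Chars.strip (pvRemoveprefix line "- [x] ".toList))

-- pass 2: query the grouped sections
def pvQuery (sh : List Char) (allowed : PySem.Set (List Char))
    (secs : List (List Char × List (List Char))) : Bool :=
  secs.any (fun s => s.1 == sh && s.2.any (pvChecked allowed))

def has_checked_option_py_alt (text : String) (section_heading : String) (labels : List String) : Bool :=
  pvQuery section_heading.toList (PySem.Set.ofList (labels.map String.toList))
    (pvGroup (PySem.Chars.splitlines text.toList) none)

-- ===== PRECONDITION & SPEC =====
def Spec_has_checked_option_py (text : String) (section_heading : String) (labels : List String) (out : Bool) : Prop := out = has_checked_option_py_alt text section_heading labels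
instance (text : String) (section_heading : String) (labels : List String) (out : Bool) : Decidable (Spec_has_checked_option_py text section_heading labels out) := by unfold Spec_has_checked_option_py; infer_instance

-- ===== CLAIM (what is proved, stated in full; the proofs are below) =====
def Claim_equal_has_checked_option_py : Prop := ∀ (text : String) (section_heading : String) (labels : List String), Dom_has_checked_option_py text section_heading labels → Spec_has_checked_option_py text section_heading labels (has_checked_option_py text section_heading labels)

-- ===== LEMMAS AND PROOFS =====

-- invariant helpers: does the current section's heading match, and does it already contain a hit
def pvHM (sh : List Char) : Option (List Char × List (List Char)) → Bool
  | none => false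
  | some (h, _) => h == sh

def pvHit (sh : List Char) (allowed : PySem.Set (List Char)) :
    Option (List Char × List (List Char)) → Bool
  | none => false
  | some (h, ls) => (h == sh) && ls.any (pvChecked allowed)

theorem pvMain (sh : List Char) (al : PySem.Set (List Char)) :
    ∀ (lines : List (List Char)) (cur : Option (List Char × List (List Char))),
      pvQuery sh al (pvGroup lines cur) = (pvHit sh al cur || pvALoop sh al lines (pvHM sh cur)) := by
  intro lines
  induction lines with
  | nil =>
    intro cur
    cases cur with
    | none => simp [pvGroup, pvQuery, pvALoop, pvHit]
    | some s => cases s with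
      | mk h ls => simp [pvGroup, pvQuery, pvALoop, pvHit]
  | cons raw rest ih =>
    intro cur
    by_cases hH : PySem.Chars.startswith (PySem.Chars.strip raw) "### ".toList = true
    · cases cur with
      | none =>
        simp only [pvGroup, pvALoop, hH, if_pos]
        rw [ih]
        simp [pvHit, pvHM]
      | some s =>
        cases s with
        | mk h ls =>
          simp only [pvGroup, pvALoop, hH, if_pos, pvQuery, List.any_cons]
          rw [show (List.any (pvGroup rest (some (PySem.Chars.strip raw, []))) fun s => s.1 == sh && s.2.any (pvChecked al)) = pvQuery sh al (pvGroup rest (some (PySem.Chars.strip raw, []))) from rfl]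
          rw [ih]
          simp [pvHit, pvHM]
    · have hH' : PySem.Chars.startswith (PySem.Chars.strip raw) "### ".toList = false :=
        Bool.not_eq_true _ |>.mp hH
      cases cur with
      | none =>
        simp only [pvGroup, pvALoop, hH', Bool.false_eq_true, if_false]
        rw [ih]
        simp [pvHit, pvHM]
      | some s =>
        cases s with
        | mk h ls =>
          simp only [pvGroup, pvALoop, hH', Bool.false_eq_true, if_false]
          rw [ih]
          simp only [pvHit, pvHM, pvChecked, List.any_append, List.any_cons, List.any_nil,
            Bool.or_false]
          cases hins : (h == sh) with
          | false => simp
          | true =>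
            cases hs : PySem.Chars.startswith (PySem.Chars.strip raw) "- [x] ".toList with
            | false => simp
            | true =>
              cases hc : PySem.Set.contains al
                  (PySem.Chars.strip (pvRemoveprefix (PySem.Chars.strip raw) "- [x] ".toList)) with
              | false => simp
              | true => simp

-- ===== VERDICT (by name: the statement is the Claim_ definition above) =====
theorem has_checked_option_py_spec : Claim_equal_has_checked_option_py := by
  intro text section_heading labels _
  unfold Spec_has_checked_option_py has_checked_option_py has_checked_option_py_alt
  rw [pvMain]
  simp [pvHit, pvHM]
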